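-- pv_equiv track=rewrite | github.com/sirthus/rulemaking-engine | feasibility_spike.py | determine_comment_retrievability
-- ===== SOURCE A (Python) =====
-- def determine_comment_retrievability(comment_checks: list) -> tuple:
--     if any(check["query_status"] == "confirmed_text" for check in comment_checks):
--         return "confirmed", []
--
--     unresolved_statuses = {"auth_failure", "rate_limited", "network_error", "unexpected_http_status", "unknown", "not_found"}
--     if any(check["query_status"] in unresolved_statuses for check in comment_checks):
--         return "unresolved", [
--             "At least one proposed-rule comment check was blocked by auth, rate limits, network issues, or missing objectId."
--         ]
--
--     if any(check["query_status"] == "metadata_only" for check in comment_checks):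
--         return "metadata_only", [
--             "Comments were returned for at least one proposed-rule document, but visible text was not confirmed in the sample payload."
--         ]
--
--     if comment_checks:
--         return "not_confirmed", []
--
--     return "unresolved", ["No relevant proposed-rule documents were available for comment retrieval checks."]
-- ===== SOURCE B (Python) =====
-- def determine_comment_retrievability(comment_checks: list) -> tuple:
--     if not comment_checks:
--         return "unresolved", ["No relevant proposed-rule documents were available for comment retrieval checks."]
--     unresolved_statuses = {"auth_failure", "rate_limited", "network_error", "unexpected_http_status", "unknown", "not_found"}
--     has_unresolved = has_metadata = False
--     for check in comment_checks:
--         status = check["query_status"]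
--         if status == "confirmed_text":
--             return "confirmed", []
--         if status in unresolved_statuses:
--             has_unresolved = True
--         elif status == "metadata_only":
--             has_metadata = True
--     if has_unresolved:
--         return "unresolved", [
--             "At least one proposed-rule comment check was blocked by auth, rate limits, network issues, or missing objectId."
--         ]
--     if has_metadata:
--         return "metadata_only", [
--             "Comments were returned for at least one proposed-rule document, but visible text was not confirmed in the sample payload."
--         ]
--     return "not_confirmed", []
-- ===== Notes on version B (the rewrite author's own statement) =====
-- stated objective: alternative
-- what changed: B replaces A's four separate any() scans over the list with a single pass that returns 'confirmed' immediately on the first confirmed check and otherwise accumulates two boolean flags, applying the same priority order afterwards.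
import Mathlib
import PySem

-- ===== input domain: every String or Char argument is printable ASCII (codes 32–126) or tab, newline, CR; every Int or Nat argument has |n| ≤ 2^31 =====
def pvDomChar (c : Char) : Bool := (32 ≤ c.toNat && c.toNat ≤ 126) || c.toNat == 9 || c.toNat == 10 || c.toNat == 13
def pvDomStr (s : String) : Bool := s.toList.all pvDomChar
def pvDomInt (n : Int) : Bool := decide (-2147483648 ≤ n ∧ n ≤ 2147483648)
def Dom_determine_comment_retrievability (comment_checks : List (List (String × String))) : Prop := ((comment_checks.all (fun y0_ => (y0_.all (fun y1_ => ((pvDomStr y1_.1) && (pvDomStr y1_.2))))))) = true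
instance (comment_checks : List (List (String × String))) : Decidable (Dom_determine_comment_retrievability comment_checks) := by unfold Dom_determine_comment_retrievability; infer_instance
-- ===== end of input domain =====

-- B replaces A's four any() scans with a single pass that returns 'confirmed' at the first confirmed
-- check and otherwise accumulates flags; same priority order and message strings.
-- Pre_ excludes exactly the inputs where the Pythons raise KeyError: a check without the
-- "query_status" key that is not preceded by a confirmed check.

-- ===== PORT A =====
-- check["query_status"]; within Pre_ every evaluated lookup finds the key, so the default "" is never used
def pvQS (check : List (String × String)) : String :=
  PySem.Dict.getD (PySem.Dict.mk check) "query_status" ""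

def pvUnresolved : List String :=
  ["auth_failure", "rate_limited", "network_error", "unexpected_http_status", "unknown", "not_found"]

def pvMsgUnresolved : String :=
  "At least one proposed-rule comment check was blocked by auth, rate limits, network issues, or missing objectId."
def pvMsgMetadata : String :=
  "Comments were returned for at least one proposed-rule document, but visible text was not confirmed in the sample payload."
def pvMsgEmpty : String :=
  "No relevant proposed-rule documents were available for comment retrieval checks."

def determine_comment_retrievability (comment_checks : List (List (String × String))) : String × List String :=
  if comment_checks.any (fun check => pvQS check == "confirmed_text") then
    ("confirmed", [])
  else if comment_checks.any (fun check => pvUnresolved.contains (pvQS check)) then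
    ("unresolved", [pvMsgUnresolved])
  else if comment_checks.any (fun check => pvQS check == "metadata_only") then
    ("metadata_only", [pvMsgMetadata])
  else if !comment_checks.isEmpty then
    ("not_confirmed", [])
  else
    ("unresolved", [pvMsgEmpty])

-- ===== PORT B =====
-- the for-loop: early return on confirmed, else carry (has_unresolved, has_metadata)
def pvLoop : List (List (String × String)) → Bool → Bool → String × List String
  | [], hu, hm =>
      if hu then ("unresolved", [pvMsgUnresolved])
      else if hm then ("metadata_only", [pvMsgMetadata])
      else ("not_confirmed", [])
  | check :: rest, hu, hm =>
      let s := pvQS check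
      if s == "confirmed_text" then ("confirmed", [])
      else if pvUnresolved.contains s then pvLoop rest true hm
      else if s == "metadata_only" then pvLoop rest hu true
      else pvLoop rest hu hm

def determine_comment_retrievability_alt (comment_checks : List (List (String × String))) : String × List String :=
  if comment_checks.isEmpty then ("unresolved", [pvMsgEmpty])
  else pvLoop comment_checks false false

-- ===== PRECONDITION & SPEC =====
-- Pre_ excludes exactly the inputs on which Python A raises KeyError: some check lacks the
-- "query_status" key and no earlier check is confirmed (so the first any() reaches it).
def Pre_determine_comment_retrievability (comment_checks : List (List (String × String))) : Prop :=
  (∀ check ∈ comment_checks, ((PySem.Dict.mk check).get? "query_status").isSome) ∨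
    (comment_checks.takeWhile (fun check => ((PySem.Dict.mk check).get? "query_status").isSome)).any
      (fun check => pvQS check == "confirmed_text") = true
instance (comment_checks : List (List (String × String))) : Decidable (Pre_determine_comment_retrievability comment_checks) := by unfold Pre_determine_comment_retrievability; infer_instance

def pvWitness_determine_comment_retrievability : (List (List (String × String))) :=
  [[("query_status", "metadata_only")], [("query_status", "other")]]

def Spec_determine_comment_retrievability (comment_checks : List (List (String × String))) (out : String × List String) : Prop := out = determine_comment_retrievability_alt comment_checks
instance (comment_checks : List (List (String × String))) (out : String × List String) : Decidable (Spec_determine_comment_retrievability comment_checks out) := by unfold Spec_determine_comment_retrievability; infer_instance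

-- ===== CLAIM (what is proved, stated in full; the proofs are below) =====
def Claim_equal_determine_comment_retrievability : Prop := ∀ (comment_checks : List (List (String × String))), Dom_determine_comment_retrievability comment_checks → Pre_determine_comment_retrievability comment_checks → Spec_determine_comment_retrievability comment_checks (determine_comment_retrievability comment_checks)

-- ===== LEMMAS AND PROOFS =====

-- B's loop computes A's three any-scans (the elif guards vanish pointwise because
-- "confirmed_text" and "metadata_only" are not unresolved statuses)
theorem pvLoop_eq (xs : List (List (String × String))) (hu hm : Bool) :
    pvLoop xs hu hm =
      if xs.any (fun k => pvQS k == "confirmed_text") then ("confirmed", [])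
      else if hu || xs.any (fun k => pvUnresolved.contains (pvQS k)) then ("unresolved", [pvMsgUnresolved])
      else if hm || xs.any (fun k => pvQS k == "metadata_only") then ("metadata_only", [pvMsgMetadata])
      else ("not_confirmed", []) := by
  induction xs generalizing hu hm with
  | nil => simp [pvLoop]
  | cons h t ih =>
      simp only [pvLoop, List.any_cons]
      by_cases h1 : pvQS h = "confirmed_text"
      · simp [h1]
      · have e1 : (pvQS h == "confirmed_text") = false := by simp [h1]
        by_cases h2 : pvQS h ∈ pvUnresolved
        · simp [e1, h2, ih]
        · by_cases h3 : pvQS h = "metadata_only"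
          · simp [h3, ih, pvUnresolved]
          · have e3 : (pvQS h == "metadata_only") = false := by simp [h3]
            simp [e1, h2, e3, ih]

-- ===== VERDICT (by name: the statement is the Claim_ definition above) =====
theorem determine_comment_retrievability_spec : Claim_equal_determine_comment_retrievability := by
  intro xs _ _
  show determine_comment_retrievability xs = determine_comment_retrievability_alt xs
  unfold determine_comment_retrievability determine_comment_retrievability_alt
  cases xs with
  | nil => simp
  | cons h t =>
      rw [pvLoop_eq]
      simp
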